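-- pv_equiv track=rewrite | github.com/autowarefoundation/autoware_system_designer | tools/topology-analyzer/lib/render.py | namespace_summary
-- ===== SOURCE A (Python) =====
-- from collections import defaultdict
-- from typing import Dict, List, Optional, Set, Tuple
--
-- def namespace_prefix(fq: str, depth: int = 2) -> str:
--     parts = [p for p in fq.strip("/").split("/") if p]
--     return "/" + "/".join(parts[:depth]) if parts else fq
--
-- def namespace_summary(
--     added: List[str],
--     removed: List[str],
--     changed: List[Tuple[str, str, object]],
-- ) -> List[str]:
--     stats: Dict[str, Dict[str, int]] = defaultdict(lambda: {"added": 0, "removed": 0, "changed": 0})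
--     for fq in added:
--         stats[namespace_prefix(fq)]["added"] += 1
--     for fq in removed:
--         stats[namespace_prefix(fq)]["removed"] += 1
--     for ofq, _nfq, _d in changed:
--         stats[namespace_prefix(ofq)]["changed"] += 1
--     lines: List[str] = []
--     for ns in sorted(stats):
--         s = stats[ns]
--         parts = []
--         if s["added"]:
--             parts.append(f"+{s['added']} added")
--         if s["removed"]:
--             parts.append(f"-{s['removed']} removed")
--         if s["changed"]:
--             parts.append(f"~{s['changed']} changed")
--         lines.append(f"- {ns}: {', '.join(parts)}")
--     return lines
-- ===== SOURCE B (Python) =====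
-- def namespace_prefix(fq: str, depth: int = 2) -> str:
--     parts = [p for p in fq.strip("/").split("/") if p]
--     return "/" + "/".join(parts[:depth]) if parts else fq
--
--
-- def namespace_summary(added, removed, changed):
--     # Flatten everything into one tagged event list, sort it by namespace,
--     # then emit one line per run of equal namespaces in a single scan.
--     events = (
--         [(namespace_prefix(fq), 0) for fq in added]
--         + [(namespace_prefix(fq), 1) for fq in removed]
--         + [(namespace_prefix(ofq), 2) for ofq, _nfq, _d in changed]
--     )
--     events.sort(key=lambda e: e[0])
--     lines = []
--     i = 0
--     n = len(events)
--     while i < n: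
--         ns = events[i][0]
--         j = i
--         while j < n and events[j][0] == ns:
--             j += 1
--         tags = [t for _, t in events[i:j]]
--         parts = []
--         if 0 in tags:
--             parts.append(f"+{tags.count(0)} added")
--         if 1 in tags:
--             parts.append(f"-{tags.count(1)} removed")
--         if 2 in tags:
--             parts.append(f"~{tags.count(2)} changed")
--         lines.append(f"- {ns}: {', '.join(parts)}")
--         i = j
--     return lines
-- ===== Notes on version B (the rewrite author's own statement) =====
-- stated objective: alternative
-- what changed: Replaces A's hash-based per-namespace count records with a sort-then-scan algorithm: all entries are flattened into one tagged (namespace, kind) event list, sorted by namespace, and the output lines are emitted in a single scan over runs of equal namespaces; no dictionary is built at all.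
import Mathlib
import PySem

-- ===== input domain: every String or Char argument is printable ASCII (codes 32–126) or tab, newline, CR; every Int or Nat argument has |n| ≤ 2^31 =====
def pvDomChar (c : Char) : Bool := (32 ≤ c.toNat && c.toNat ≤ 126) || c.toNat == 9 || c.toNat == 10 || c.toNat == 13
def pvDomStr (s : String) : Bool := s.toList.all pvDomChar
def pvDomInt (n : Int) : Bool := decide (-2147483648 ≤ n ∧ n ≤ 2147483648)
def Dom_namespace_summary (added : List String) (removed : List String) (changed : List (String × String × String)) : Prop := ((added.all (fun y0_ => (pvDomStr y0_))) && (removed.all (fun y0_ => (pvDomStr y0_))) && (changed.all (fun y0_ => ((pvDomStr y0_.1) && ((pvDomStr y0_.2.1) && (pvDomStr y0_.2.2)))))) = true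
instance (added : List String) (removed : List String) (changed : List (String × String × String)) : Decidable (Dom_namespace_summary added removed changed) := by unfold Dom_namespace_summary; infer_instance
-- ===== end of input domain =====

-- B replaces A's hash-based per-namespace count records by a sort-then-scan algorithm:
-- one tagged (namespace, kind) event list, sorted by namespace, emitted run by run
-- in a single scan (objective: alternative; no dictionary at all).

-- ===== PORT A =====

-- module helper namespace_prefix (called with the default depth=2 only; parts[:2] = take 2)
def namespace_prefix (fq : String) : String :=
  -- sep "/" is nonempty, so split? is always some
  let parts := (((PySem.Str.split? (PySem.Str.stripChars fq "/") "/").getD []).filter (fun p => p ≠ ""))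
  if parts ≠ [] then "/" ++ PySem.Str.join "/" (parts.take 2) else fq

-- the defaultdict's default factory value {"added": 0, "removed": 0, "changed": 0}
def pvDefaultInner : PySem.Dict String Int :=
  PySem.Dict.ofList [("added", 0), ("removed", 0), ("changed", 0)]

def namespace_summary (added : List String) (removed : List String) (changed : List (String × String × String)) : List String :=
  -- stats[ns][field] += 1 via defaultdict: read (default if absent), bump the field, store back
  let stats : PySem.Dict String (PySem.Dict String Int) :=
    added.foldl (fun d fq =>
      d.insert (namespace_prefix fq)
        ((d.getD (namespace_prefix fq) pvDefaultInner).insert "added"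
          ((d.getD (namespace_prefix fq) pvDefaultInner).getD "added" 0 + 1))) PySem.Dict.empty
  let stats :=
    removed.foldl (fun d fq =>
      d.insert (namespace_prefix fq)
        ((d.getD (namespace_prefix fq) pvDefaultInner).insert "removed"
          ((d.getD (namespace_prefix fq) pvDefaultInner).getD "removed" 0 + 1))) stats
  let stats :=
    changed.foldl (fun d t =>
      d.insert (namespace_prefix t.1)
        ((d.getD (namespace_prefix t.1) pvDefaultInner).insert "changed"
          ((d.getD (namespace_prefix t.1) pvDefaultInner).getD "changed" 0 + 1))) stats
  -- for ns in sorted(stats): ns ∈ stats.keys, so stats[ns] never raises; getD is exact here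
  (PySem.List.sorted stats.keys (fun x => x) false).foldl (fun lines ns =>
    let s := stats.getD ns pvDefaultInner
    let parts : List String := []
    let parts := if s.getD "added" 0 ≠ 0 then parts ++ ["+" ++ PySem.Int.toStr (s.getD "added" 0) ++ " added"] else parts
    let parts := if s.getD "removed" 0 ≠ 0 then parts ++ ["-" ++ PySem.Int.toStr (s.getD "removed" 0) ++ " removed"] else parts
    let parts := if s.getD "changed" 0 ≠ 0 then parts ++ ["~" ++ PySem.Int.toStr (s.getD "changed" 0) ++ " changed"] else parts
    lines ++ ["- " ++ ns ++ ": " ++ PySem.Str.join ", " parts]) []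

-- ===== PORT B =====

-- the outer while over i: each step consumes the run events[i:j] of the leading namespace
-- (inner while finding j = takeWhile; i = j → the dropWhile suffix) and emits its line
def pvRuns : List (String × Int) → List String
  | [] => []
  | e :: rest =>
    let ns := e.1
    let run := e :: rest.takeWhile (fun x => x.1 == ns)
    let tags := run.map Prod.snd
    let parts : List String := []
    let parts := if (0 : Int) ∈ tags then parts ++ ["+" ++ PySem.Int.toStr (tags.count 0) ++ " added"] else parts
    let parts := if (1 : Int) ∈ tags then parts ++ ["-" ++ PySem.Int.toStr (tags.count 1) ++ " removed"] else parts
    let parts := if (2 : Int) ∈ tags then parts ++ ["~" ++ PySem.Int.toStr (tags.count 2) ++ " changed"] else parts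
    ("- " ++ ns ++ ": " ++ PySem.Str.join ", " parts) :: pvRuns (rest.dropWhile (fun x => x.1 == ns))
  termination_by l => l.length
  decreasing_by simpa using Nat.lt_succ_of_le (List.length_dropWhile_le _ rest)

def namespace_summary_alt (added : List String) (removed : List String) (changed : List (String × String × String)) : List String :=
  let events : List (String × Int) :=
    added.map (fun fq => (namespace_prefix fq, (0 : Int)))
    ++ removed.map (fun fq => (namespace_prefix fq, (1 : Int)))
    ++ changed.map (fun t => (namespace_prefix t.1, (2 : Int)))
  pvRuns (PySem.List.sorted events (fun e => e.1) false)

-- ===== PRECONDITION & SPEC =====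
def Spec_namespace_summary (added : List String) (removed : List String) (changed : List (String × String × String)) (out : List String) : Prop := out = namespace_summary_alt added removed changed
instance (added : List String) (removed : List String) (changed : List (String × String × String)) (out : List String) : Decidable (Spec_namespace_summary added removed changed out) := by unfold Spec_namespace_summary; infer_instance

-- ===== CLAIM (what is proved, stated in full; the proofs are below) =====
def Claim_equal_namespace_summary : Prop := ∀ (added : List String) (removed : List String) (changed : List (String × String × String)), Dom_namespace_summary added removed changed → Spec_namespace_summary added removed changed (namespace_summary added removed changed)

-- ===== LEMMAS AND PROOFS =====

-- the canonical line both programs print for namespace ns with counts a/r/c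
def pvLine (ns : String) (a r c : Nat) : String :=
  "- " ++ ns ++ ": " ++ PySem.Str.join ", "
    ((if a ≠ 0 then ["+" ++ PySem.Int.toStr (a : Int) ++ " added"] else [])
     ++ (if r ≠ 0 then ["-" ++ PySem.Int.toStr (r : Int) ++ " removed"] else [])
     ++ (if c ≠ 0 then ["~" ++ PySem.Int.toStr (c : Int) ++ " changed"] else []))

theorem pv_fold_field {α : Type} (key : α → String) (f g : String) (l : List α)
    (d : PySem.Dict String (PySem.Dict String Int)) (ns : String) :
    ((l.foldl (fun d x =>
        d.insert (key x)
          ((d.getD (key x) pvDefaultInner).insert f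
            ((d.getD (key x) pvDefaultInner).getD f 0 + 1))) d).getD ns pvDefaultInner).getD g 0
    = (d.getD ns pvDefaultInner).getD g 0
      + if g = f then ((l.map key).count ns : Int) else 0 := by
  induction l generalizing d with
  | nil => simp
  | cons x l ih =>
    simp only [List.foldl_cons, ih, List.map_cons, List.count_cons]
    rw [PySem.Dict.getD_insert]
    by_cases hns : ns = key x
    · subst hns
      simp only [PySem.Dict.getD_insert, beq_self_eq_true, if_true]
      split_ifs with hg
      · subst hg; push_cast; ring
      · ring
    · rw [if_neg hns]
      have : (key x == ns) = false := by
        simp [beq_eq_false_iff_ne]; exact fun h => hns h.symm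
      simp [this]

theorem pv_foldl_append_map {α β : Type} (l : List α) (f : α → β) (acc : List β) :
    l.foldl (fun acc x => acc ++ [f x]) acc = acc ++ l.map f := by
  induction l generalizing acc with
  | nil => simp
  | cons x l ih => simp [ih]

theorem pv_dflt_added : pvDefaultInner.getD "added" 0 = 0 := by decide
theorem pv_dflt_removed : pvDefaultInner.getD "removed" 0 = 0 := by decide
theorem pv_dflt_changed : pvDefaultInner.getD "changed" 0 = 0 := by decide

-- A equals pvLine over the sorted distinct prefixes
theorem pv_A_canon (added removed : List String) (changed : List (String × String × String)) :
    namespace_summary added removed changed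
    = (PySem.List.sorted (PySem.Set.ofList
        (added.map namespace_prefix ++ removed.map namespace_prefix
         ++ changed.map (fun t => namespace_prefix t.1))) (fun x => x) false).map
        (fun ns => pvLine ns ((added.map namespace_prefix).count ns)
          ((removed.map namespace_prefix).count ns)
          ((changed.map (fun t => namespace_prefix t.1)).count ns)) := by
  unfold namespace_summary
  simp only [PySem.Dict.keys_foldl_insert_key, PySem.Dict.keys_empty,
    PySem.Set.update_nil_left, ← PySem.Set.ofList_append, pv_foldl_append_map,
    List.nil_append, List.append_assoc]
  apply List.map_congr_left
  intro ns _
  rw [pv_fold_field, pv_fold_field, pv_fold_field,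
      pv_fold_field, pv_fold_field, pv_fold_field,
      pv_fold_field, pv_fold_field, pv_fold_field]
  simp only [PySem.Dict.getD_empty, pv_dflt_added, pv_dflt_removed, pv_dflt_changed,
    String.reduceEq, if_false, if_true, zero_add, add_zero]
  rw [pvLine]
  split_ifs <;> simp_all

-- ===== B-side lemmas =====

theorem pv_filter_ofList {α : Type} [DecidableEq α] (p : α → Bool) :
    ∀ l : List α, (PySem.Set.ofList l).filter p = PySem.Set.ofList (l.filter p) := by
  intro l
  induction l with
  | nil => rfl
  | cons y l ih =>
    rw [PySem.Set.ofList_cons, List.filter_cons]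
    unfold PySem.Set.discard
    by_cases hp : p y
    · simp only [hp, List.filter_cons, if_true]
      rw [PySem.Set.ofList_cons]
      unfold PySem.Set.discard
      rw [List.filter_comm, ih]
    · simp only [hp, Bool.false_eq_true, if_false]
      rw [List.filter_comm, ih]
      rw [show List.filter p (y :: l) = List.filter p l from by simp [hp]]
      apply List.filter_eq_self.mpr
      intro a ha
      have ha' : a ∈ l.filter p := (PySem.Set.mem_ofList _ _).1 ha
      have hpa : p a = true := (List.mem_filter.1 ha').2
      simp only [Bool.not_eq_eq_eq_not, Bool.not_true, beq_eq_false_iff_ne, ne_eq]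
      intro h; subst h; simp_all

theorem pv_pairwise_lt_ofList :
    ∀ l : List String, l.Pairwise (· ≤ ·) → (PySem.Set.ofList l).Pairwise (· < ·) := by
  intro l
  induction l with
  | nil => intro _; exact List.Pairwise.nil
  | cons x l ih =>
    intro h
    rw [List.pairwise_cons] at h
    rw [PySem.Set.ofList_cons]
    unfold PySem.Set.discard
    rw [List.pairwise_cons]
    constructor
    · intro y hy
      have hyl : y ∈ PySem.Set.ofList l := (List.mem_filter.1 hy).1
      have hne : (y == x) = false := by
        have := (List.mem_filter.1 hy).2; simpa using this
      have : x ≤ y := h.1 y ((PySem.Set.mem_ofList _ _).1 hyl)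
      exact lt_of_le_of_ne this (fun he => by simp [he.symm] at hne)
    · exact (ih h.2).sublist List.filter_sublist

theorem pv_take_drop_filter (ns : String) :
    ∀ l : List (String × Int), l.Pairwise (fun a b => a.1 ≤ b.1) →
      (∀ x ∈ l, ns ≤ x.1) →
      l.takeWhile (fun x => x.1 == ns) = l.filter (fun x => x.1 == ns)
      ∧ l.dropWhile (fun x => x.1 == ns) = l.filter (fun x => !(x.1 == ns)) := by
  intro l
  induction l with
  | nil => intro _ _; exact ⟨rfl, rfl⟩
  | cons y t ih =>
    intro hp hge
    rw [List.pairwise_cons] at hp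
    by_cases hy : y.1 = ns
    · have hb : (y.1 == ns) = true := by simpa using hy
      have ih' := ih hp.2 (fun x hx => le_trans (hge y (by simp)) (by simpa [hy] using hp.1 x hx))
      constructor
      · rw [List.takeWhile_cons, hb, List.filter_cons, hb]
        simp [ih'.1]
      · rw [List.dropWhile_cons, hb, List.filter_cons, hb]
        simp [ih'.2]
    · have hb : (y.1 == ns) = false := by simpa using hy
      have hlt : ns < y.1 := lt_of_le_of_ne (hge y (by simp)) (Ne.symm hy)
      have hall : ∀ x ∈ t, ¬ (x.1 == ns) = true := by
        intro x hx hc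
        have : y.1 ≤ x.1 := hp.1 x hx
        rw [beq_iff_eq] at hc
        rw [hc] at this
        exact absurd this (not_le.2 hlt)
      constructor
      · rw [List.takeWhile_cons, hb, List.filter_cons, hb]
        simp only [Bool.false_eq_true, if_false]
        have : t.filter (fun x => x.1 == ns) = [] := List.filter_eq_nil_iff.2 hall
        simp [this]
      · rw [List.dropWhile_cons, hb, List.filter_cons, hb]
        simp only [Bool.not_false, if_true]
        have : t.filter (fun x => !(x.1 == ns)) = t :=
          List.filter_eq_self.2 (fun a ha => by simpa using hall a ha)
        simp [this]

theorem pv_count_map_snd_filter (ns : String) (t : Int) :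
    ∀ l : List (String × Int),
      ((l.filter (fun x => x.1 == ns)).map Prod.snd).count t = l.count (ns, t) := by
  intro l
  induction l with
  | nil => simp
  | cons e l ih =>
    obtain ⟨e1, e2⟩ := e
    by_cases h : e1 = ns
    · subst h
      rw [List.filter_cons]
      simp only [beq_self_eq_true, if_true, List.map_cons, List.count_cons, ih]
      by_cases ht : t = e2 <;> simp [Prod.ext_iff, ht]
    · have hb : ((e1, e2).1 == ns) = false := by simpa using h
      rw [List.filter_cons, hb]
      simp only [Bool.false_eq_true, if_false, ih, List.count_cons]
      have hne : ¬ ((e1, e2) = (ns, t)) := by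
        intro hc
        exact h (congrArg Prod.fst hc)
      simp [hne]

theorem pv_runs_eq : ∀ (s : List (String × Int)), s.Pairwise (fun a b => a.1 ≤ b.1) →
    pvRuns s = (PySem.Set.ofList (s.map Prod.fst)).map
      (fun ns => pvLine ns (s.count (ns, 0)) (s.count (ns, 1)) (s.count (ns, 2))) := by
  intro s
  induction s using pvRuns.induct with
  | case1 => intro _; simp [pvRuns]
  | case2 e rest x ih =>
    intro hp
    rw [List.pairwise_cons] at hp
    obtain ⟨hge, hrest⟩ := hp
    obtain ⟨htw, hdw⟩ := pv_take_drop_filter e.1 rest hrest hge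
    have htail_pw : (rest.filter (fun x => !(x.1 == e.1))).Pairwise (fun a b => a.1 ≤ b.1) :=
      hrest.sublist List.filter_sublist
    have hdp : (rest.dropWhile (fun x => x.1 == e.1)).Pairwise (fun a b => a.1 ≤ b.1) := by
      rw [hdw]; exact htail_pw
    have ih' := ih hdp
    rw [hdw] at ih'
    -- the key-set of the whole list is e.1 followed by the key-set of the tail run
    have hmapfil : (rest.map Prod.fst).filter (fun k => !(k == e.1))
        = (rest.filter (fun x => !(x.1 == e.1))).map Prod.fst := by
      simp [List.filter_map]; rfl
    have hkeys : PySem.Set.ofList ((e :: rest).map Prod.fst)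
        = e.1 :: PySem.Set.ofList ((rest.filter (fun x => !(x.1 == e.1))).map Prod.fst) := by
      rw [List.map_cons, PySem.Set.ofList_cons]
      unfold PySem.Set.discard
      rw [pv_filter_ofList, hmapfil]
    rw [hkeys, List.map_cons]
    show pvRuns (e :: rest) = _
    rw [pvRuns]
    rw [htw, hdw, ih']
    congr 1
    · -- the head line
      have hfc : (e :: rest).filter (fun x => x.1 == e.1) = e :: rest.filter (fun x => x.1 == e.1) := by
        rw [List.filter_cons]; simp
      have htags : ∀ t : Int, ((e :: rest.filter (fun x => x.1 == e.1)).map Prod.snd).count t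
          = (e :: rest).count (e.1, t) := by
        intro t
        rw [← hfc, pv_count_map_snd_filter]
      have hmem : ∀ t : Int, ((t ∈ (e :: rest.filter (fun x => x.1 == e.1)).map Prod.snd))
          ↔ (e :: rest).count (e.1, t) ≠ 0 := by
        intro t
        rw [← htags t]
        rw [← List.count_pos_iff]
        omega
      rw [pvLine]
      simp only [hmem, htags]
      split_ifs <;> simp
    · -- the tail lines
      apply List.map_congr_left
      intro ns hns
      have hns' : ns ∈ (rest.filter (fun x => !(x.1 == e.1))).map Prod.fst :=
        (PySem.Set.mem_ofList _ _).1 hns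
      obtain ⟨xx, hxx, hxns⟩ := List.mem_map.1 hns'
      have hxne : ¬ (xx.1 == e.1) = true := by
        have := (List.mem_filter.1 hxx).2; simpa using this
      have hne : ns ≠ e.1 := by rw [← hxns]; simpa using hxne
      have hcnt : ∀ t : Int, (rest.filter (fun x => !(x.1 == e.1))).count (ns, t)
          = (e :: rest).count (ns, t) := by
        intro t
        rw [List.count_filter (by simp [hne])]
        rw [List.count_cons]
        have h1 : ¬ ((ns, t) = e) := fun hc => hne (by rw [← hc])
        have h2 : ¬ (e = (ns, t)) := fun hc => h1 hc.symm
        simp [h2]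
      rw [hcnt, hcnt, hcnt]

theorem pv_count_map_tag (X : List String) (t0 : Int) (ns : String) (t : Int) :
    (X.map (fun x => (x, t0))).count (ns, t) = if t = t0 then X.count ns else 0 := by
  induction X with
  | nil => simp
  | cons x X ih =>
    simp only [List.map_cons, List.count_cons, ih]
    by_cases ht : t = t0 <;> by_cases hx : x = ns
    · subst ht; subst hx; simp
    · subst ht; simp [Prod.ext_iff, hx]
    · subst hx; simp [Prod.ext_iff, ht]; omega
    · simp [Prod.ext_iff, ht, hx]

theorem pv_main_gen (X Y Z : List String) :
    pvRuns (PySem.List.sorted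
        (X.map (fun x => (x, (0 : Int))) ++ Y.map (fun x => (x, (1 : Int)))
         ++ Z.map (fun x => (x, (2 : Int)))) (fun e => e.1) false)
    = (PySem.List.sorted (PySem.Set.ofList (X ++ Y ++ Z)) (fun x => x) false).map
        (fun ns => pvLine ns (X.count ns) (Y.count ns) (Z.count ns)) := by
  have hs_pw := PySem.List.sorted_pairwise
    (X.map (fun x => (x, (0 : Int))) ++ Y.map (fun x => (x, (1 : Int)))
     ++ Z.map (fun x => (x, (2 : Int)))) (fun e => e.1)
  have hperm := PySem.List.sorted_perm
    (X.map (fun x => (x, (0 : Int))) ++ Y.map (fun x => (x, (1 : Int)))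
     ++ Z.map (fun x => (x, (2 : Int)))) (fun e => e.1) false
  rw [pv_runs_eq _ hs_pw]
  have hmapfst : (X.map (fun x => (x, (0 : Int))) ++ Y.map (fun x => (x, (1 : Int)))
      ++ Z.map (fun x => (x, (2 : Int)))).map Prod.fst = X ++ Y ++ Z := by
    simp [List.map_map, Function.comp_def]
  have hkeys : PySem.List.sorted (PySem.Set.ofList (X ++ Y ++ Z)) (fun x => x) false
      = PySem.Set.ofList ((PySem.List.sorted
          (X.map (fun x => (x, (0 : Int))) ++ Y.map (fun x => (x, (1 : Int)))
           ++ Z.map (fun x => (x, (2 : Int)))) (fun e => e.1) false).map Prod.fst) := by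
    apply PySem.List.sorted_eq_of_perm_of_pairwise_lt
    · apply (List.perm_ext_iff_of_nodup (PySem.Set.nodup_ofList _) (PySem.Set.nodup_ofList _)).2
      intro a
      rw [PySem.Set.mem_ofList, PySem.Set.mem_ofList, (hperm.map Prod.fst).mem_iff, hmapfst]
    · exact pv_pairwise_lt_ofList _ (PySem.List.sorted_map_key_pairwise _ _)
  rw [hkeys]
  apply List.map_congr_left
  intro ns _
  have hcnt : ∀ t : Int, ((PySem.List.sorted
      (X.map (fun x => (x, (0 : Int))) ++ Y.map (fun x => (x, (1 : Int)))
       ++ Z.map (fun x => (x, (2 : Int)))) (fun e => e.1) false)).count (ns, t)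
      = (X.map (fun x => (x, (0 : Int)))).count (ns, t)
        + (Y.map (fun x => (x, (1 : Int)))).count (ns, t)
        + (Z.map (fun x => (x, (2 : Int)))).count (ns, t) := by
    intro t
    rw [hperm.count_eq, List.count_append, List.count_append]
  rw [hcnt, hcnt, hcnt,
      pv_count_map_tag, pv_count_map_tag, pv_count_map_tag,
      pv_count_map_tag, pv_count_map_tag, pv_count_map_tag,
      pv_count_map_tag, pv_count_map_tag, pv_count_map_tag]
  norm_num

theorem pv_main (added removed : List String) (changed : List (String × String × String)) :
    namespace_summary added removed changed = namespace_summary_alt added removed changed := by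
  unfold namespace_summary_alt
  rw [pv_A_canon,
      show added.map (fun fq => (namespace_prefix fq, (0 : Int)))
        = (added.map namespace_prefix).map (fun x => (x, (0 : Int))) by rw [List.map_map]; rfl,
      show removed.map (fun fq => (namespace_prefix fq, (1 : Int)))
        = (removed.map namespace_prefix).map (fun x => (x, (1 : Int))) by rw [List.map_map]; rfl,
      show changed.map (fun t => (namespace_prefix t.1, (2 : Int)))
        = (changed.map (fun t => namespace_prefix t.1)).map (fun x => (x, (2 : Int))) by rw [List.map_map]; rfl,
      pv_main_gen]

-- ===== VERDICT (by name: the statement is the Claim_ definition above) =====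
theorem namespace_summary_spec : Claim_equal_namespace_summary := by
  intro added removed changed _
  exact pv_main added removed changed
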